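-- pv_equiv track=rewrite | github.com/Aasthaengg/IBMdataset | Python_codes/p03209/s697326039.py | calc
-- ===== SOURCE A (Python) =====
-- def layers(n):
--     result = 1
--     for _ in range(0, n):
--         result = result * 2 + 3
--     return result
--
-- def meat(n):
--     result = 1
--     for _ in range(0, n):
--         result = result * 2 + 1
--     return result
--
-- def calc(n, x):
--     before_layer = layers(n - 1)
--     before_meat = meat(n - 1)
--     if x == 1:
--         return 1 if n == 0 else 0
--     elif x <= 1 + before_layer:
--         return calc(n - 1, x - 1)
--     elif x == 2 + before_layer:
--         return 1 + before_meat
--     elif x <= 2 + 2 * before_layer: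
--         return 1 + before_meat + calc(n - 1, x - 2 - before_layer)
--     elif x == 3 + 2 * before_layer:
--         return 2 * before_meat + 1
-- ===== SOURCE B (Python) =====
-- def calc(n, x):
--     total = 0
--     while True:
--         if x == 1:
--             return total + (1 if n == 0 else 0)
--         L = 2 ** (n + 1) - 3
--         M = 2 ** n - 1
--         if x <= 1 + L:
--             n, x = n - 1, x - 1
--         elif x == 2 + L:
--             return total + 1 + M
--         elif x <= 2 + 2 * L:
--             total += 1 + M
--             n, x = n - 1, x - 2 - L
--         else:
--             return total + 2 * M + 1
-- ===== Notes on version B (the rewrite author's own statement) =====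
-- stated objective: faster
-- what changed: Replaces A's recursion (which recomputes layers/meat by O(n) loops at every level) with a single iterative descent that uses the closed forms layers(n-1)=2^(n+1)-3 and meat(n-1)=2^n-1 and an accumulator instead of call-stack additions.
-- outside the precondition, e.g. on calc(0, 2): A returns 0, B returns 1; on calc(-3, 3): A returns 2, B returns -0.75
import Mathlib
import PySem

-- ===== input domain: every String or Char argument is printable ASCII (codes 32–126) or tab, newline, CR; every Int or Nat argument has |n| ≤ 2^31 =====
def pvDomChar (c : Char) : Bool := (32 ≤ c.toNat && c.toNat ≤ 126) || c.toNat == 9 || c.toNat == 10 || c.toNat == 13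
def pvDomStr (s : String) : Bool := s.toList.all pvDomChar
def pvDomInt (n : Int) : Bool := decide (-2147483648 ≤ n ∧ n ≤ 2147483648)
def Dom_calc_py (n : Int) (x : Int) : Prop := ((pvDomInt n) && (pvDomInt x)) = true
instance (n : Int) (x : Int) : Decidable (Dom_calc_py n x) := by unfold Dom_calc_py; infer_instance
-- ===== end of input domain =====

-- B replaces A's recursion with its O(n)-loop helpers by one iterative descent using
-- closed-form powers of two and an accumulator (objective: faster).

-- ===== PORT A =====
def layersP (n : Int) : Int :=
  (PySem.List.pyRange 0 n 1).foldl (fun r _ => r * 2 + 3) 1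

def meatP (n : Int) : Int :=
  (PySem.List.pyRange 0 n 1).foldl (fun r _ => r * 2 + 1) 1

-- fuel makes the Python recursion total; inside Pre_ the fuel x.toNat+1 is never exhausted.
def calcA : Nat → Int → Int → Int
  | 0, _, _ => 0
  | f + 1, n, x =>
    let bl := layersP (n - 1)
    let bm := meatP (n - 1)
    if x = 1 then (if n = 0 then 1 else 0)
    else if x ≤ 1 + bl then calcA f (n - 1) (x - 1)
    else if x = 2 + bl then 1 + bm
    else if x ≤ 2 + 2 * bl then 1 + bm + calcA f (n - 1) (x - 2 - bl)
    else if x = 3 + 2 * bl then 2 * bm + 1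
    else 0  -- Python falls off the elif chain and returns None here; excluded by Pre_

def calc_py (n : Int) (x : Int) : Int := calcA (x.toNat + 1) n x

-- ===== PORT B =====
-- the while-loop of Source B; `2 ** (n+1)` is ported as 2 ^ (n+1).toNat, exact on Pre_
-- (whenever the loop body runs past the x == 1 test, n ≥ 1); fuel as above.
def calcBGo : Nat → Int → Int → Int → Int
  | 0, total, _, _ => total
  | f + 1, total, n, x =>
    if x = 1 then total + (if n = 0 then 1 else 0)
    else
      let L : Int := 2 ^ (n + 1).toNat - 3
      let M : Int := 2 ^ n.toNat - 1
      if x ≤ 1 + L then calcBGo f total (n - 1) (x - 1)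
      else if x = 2 + L then total + 1 + M
      else if x ≤ 2 + 2 * L then calcBGo f (total + 1 + M) (n - 1) (x - 2 - L)
      else total + 2 * M + 1

def calc_py_alt (n : Int) (x : Int) : Int := calcBGo (x.toNat + 1) 0 n x

-- ===== PRECONDITION & SPEC =====
-- Pre_ excludes inputs outside a valid level-n burger (n < 0, x < 1, or x beyond the
-- total layer count 2^(n+2)-3, except x = 1 which always returns): there A diverges,
-- returns None, or returns accidental values from recursing into negative levels,
-- while B returns floats there (2**(n+1) with n < 0).
def Pre_calc_py (n : Int) (x : Int) : Prop :=
  x = 1 ∨ (0 ≤ n ∧ 1 ≤ x ∧ x ≤ 2 ^ (n.toNat + 2) - 3)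
instance (n : Int) (x : Int) : Decidable (Pre_calc_py n x) := by
  unfold Pre_calc_py; infer_instance

def pvWitness_calc_py : Int × Int := (2, 7)

def Spec_calc_py (n : Int) (x : Int) (out : Int) : Prop := out = calc_py_alt n x
instance (n : Int) (x : Int) (out : Int) : Decidable (Spec_calc_py n x out) := by
  unfold Spec_calc_py; infer_instance

-- ===== CLAIM (what is proved, stated in full; the proofs are below) =====
def Claim_equal_calc_py : Prop :=
  ∀ (n : Int) (x : Int), Dom_calc_py n x → Pre_calc_py n x → Spec_calc_py n x (calc_py n x)

-- ===== LEMMAS AND PROOFS =====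

lemma foldl_layers (l : List Int) (r : Int) :
    l.foldl (fun r _ => r * 2 + 3) r = 2 ^ l.length * (r + 3) - 3 := by
  induction l generalizing r with
  | nil => simp
  | cons a t ih => simp [List.foldl, ih, pow_succ]; ring

lemma foldl_meat (l : List Int) (r : Int) :
    l.foldl (fun r _ => r * 2 + 1) r = 2 ^ l.length * (r + 1) - 1 := by
  induction l generalizing r with
  | nil => simp
  | cons a t ih => simp [List.foldl, ih, pow_succ]; ring

lemma layersP_eq (n : Int) : layersP n = 2 ^ (n.toNat + 2) - 3 := by
  simp [layersP, foldl_layers, PySem.List.length_pyRange_one, pow_succ]; ring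

lemma meatP_eq (n : Int) : meatP n = 2 ^ (n.toNat + 1) - 1 := by
  simp [meatP, foldl_meat, PySem.List.length_pyRange_one, pow_succ]

lemma calc_main (f : Nat) :
    ∀ (n x total : Int), Pre_calc_py n x → x.toNat < f →
      calcBGo f total n x = total + calcA f n x := by
  induction f with
  | zero => intro n x total _ hf; omega
  | succ f ih =>
    intro n x total hpre _
    by_cases hx1 : x = 1
    · simp [calcA, calcBGo, hx1]
    · rcases hpre with h1 | ⟨hn, hx, hub⟩
      · exact absurd h1 hx1
      -- n ≥ 1: otherwise n.toNat = 0 and the bound forces x = 1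
      have hP1 : (1 : Int) ≤ 2 ^ (n.toNat - 1) := one_le_pow₀ (by norm_num)
      have hn1 : 1 ≤ n := by
        by_contra h
        have hn0 : n = 0 := by omega
        simp [hn0] at hub; omega
      set P : Int := 2 ^ (n.toNat - 1) with hP
      have hk : (n - 1).toNat = n.toNat - 1 := by omega
      have hbl : layersP (n - 1) = 4 * P - 3 := by
        rw [layersP_eq, hk, hP]; ring_nf
      have hbm : meatP (n - 1) = 2 * P - 1 := by
        rw [meatP_eq, hk, hP, pow_succ]; ring
      have hLB : (2 : Int) ^ (n + 1).toNat - 3 = 4 * P - 3 := by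
        rw [show (n + 1).toNat = (n.toNat - 1) + 1 + 1 by omega, pow_succ, pow_succ, hP]
        ring
      have hMB : (2 : Int) ^ n.toNat - 1 = 2 * P - 1 := by
        rw [show n.toNat = (n.toNat - 1) + 1 by omega, pow_succ, hP]; ring
      have hub' : x ≤ 8 * P - 3 := by
        rw [show n.toNat + 2 = (n.toNat - 1) + 1 + 1 + 1 by omega, pow_succ, pow_succ,
          pow_succ, ← hP] at hub
        linarith
      have hchildub : (2 : Int) ^ ((n - 1).toNat + 2) - 3 = 4 * P - 3 := by
        rw [hk, show n.toNat - 1 + 2 = (n.toNat - 1) + 1 + 1 by omega, pow_succ, pow_succ,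
          hP]
        ring
      simp only [calcA, calcBGo, hbl, hbm, hLB, hMB, if_neg hx1]
      by_cases h2 : x ≤ 1 + (4 * P - 3)
      · rw [if_pos h2, if_pos h2]
        exact ih (n - 1) (x - 1) total
          (Or.inr ⟨by omega, by omega, by rw [hchildub]; omega⟩) (by omega)
      · rw [if_neg h2, if_neg h2]
        by_cases h3 : x = 2 + (4 * P - 3)
        · rw [if_pos h3, if_pos h3]; ring
        · rw [if_neg h3, if_neg h3]
          by_cases h4 : x ≤ 2 + 2 * (4 * P - 3)
          · rw [if_pos h4, if_pos h4]
            rw [ih (n - 1) (x - 2 - (4 * P - 3)) (total + 1 + (2 * P - 1))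
              (Or.inr ⟨by omega, by omega, by rw [hchildub]; omega⟩) (by omega)]
            ring
          · rw [if_neg h4, if_neg h4, if_pos (by omega : x = 3 + 2 * (4 * P - 3))]
            ring

-- ===== VERDICT (by name: the statement is the Claim_ definition above) =====
theorem calc_py_spec : Claim_equal_calc_py := by
  intro n x _ hpre
  unfold Spec_calc_py calc_py calc_py_alt
  rw [calc_main (x.toNat + 1) n x 0 hpre (by omega)]
  ring
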